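-- pv_equiv track=rewrite | github.com/elisabetj/forritun_lausnir | assignments/07plus_functions/a07p07find/complete_autograder_setup/submissions/run_time_error/no_default.py | find_index_of_kth_occurrence
-- ===== SOURCE A (Python) =====
-- def find_index_of_kth_occurrence(
--     sequence: str, element_to_find: str, occurrence: int
-- ) -> int:
--     """Returns the location of the k-th occurrence of an element within a sequence."""
--
--     seen_so_far = 0
--     for index, element in enumerate(sequence):
--         if element == element_to_find:
--             seen_so_far += 1
--             if seen_so_far == occurrence:
--                 return index
-- ===== SOURCE B (Python) =====
-- def find_index_of_kth_occurrence(
--     sequence: str, element_to_find: str, occurrence: int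
-- ) -> int:
--     """Returns the location of the k-th occurrence of an element within a sequence."""
--     positions = [i for i, e in enumerate(sequence) if e == element_to_find]
--     if 1 <= occurrence <= len(positions):
--         return positions[occurrence - 1]
--     return None
-- ===== Notes on version B (the rewrite author's own statement) =====
-- stated objective: alternative
-- what changed: B builds the full list of matching positions in one comprehension and then answers by direct indexing with a bounds guard, instead of A's running counter with early exit inside the scan.
import Mathlib
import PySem

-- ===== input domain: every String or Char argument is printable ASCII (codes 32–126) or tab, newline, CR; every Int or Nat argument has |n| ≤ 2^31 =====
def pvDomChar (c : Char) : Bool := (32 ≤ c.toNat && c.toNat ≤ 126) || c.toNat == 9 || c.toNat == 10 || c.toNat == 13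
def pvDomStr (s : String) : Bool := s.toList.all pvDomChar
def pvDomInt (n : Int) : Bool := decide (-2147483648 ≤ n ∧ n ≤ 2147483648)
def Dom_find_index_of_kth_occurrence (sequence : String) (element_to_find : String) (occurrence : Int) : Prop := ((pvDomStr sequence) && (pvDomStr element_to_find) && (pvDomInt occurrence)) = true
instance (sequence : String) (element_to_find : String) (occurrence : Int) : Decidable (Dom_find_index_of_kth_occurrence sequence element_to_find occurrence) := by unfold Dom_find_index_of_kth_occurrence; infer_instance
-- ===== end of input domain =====

-- B replaces A's running counter with early exit by building the list of all matching
-- positions once and indexing into it (alternative decomposition, same cost, return value only).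

-- ===== PORT A =====
-- A's loop: enumerate characters, count matches, return the index when the counter hits `occurrence`.
def findA_loop (elem : String) (occ : Int) : List Char → Int → Int → Option Int
  | [], _, _ => none
  | c :: rest, idx, seen =>
    if String.ofList [c] = elem then
      if seen + 1 = occ then some idx
      else findA_loop elem occ rest (idx + 1) (seen + 1)
    else findA_loop elem occ rest (idx + 1) seen

def find_index_of_kth_occurrence (sequence : String) (element_to_find : String) (occurrence : Int) : Option Int :=
  findA_loop element_to_find occurrence sequence.toList 0 0

-- ===== PORT B =====
-- B's comprehension: the indices i with sequence[i] == element_to_find, in order.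
def findB_positions (elem : String) : List Char → Int → List Int
  | [], _ => []
  | c :: rest, idx =>
    if String.ofList [c] = elem then idx :: findB_positions elem rest (idx + 1)
    else findB_positions elem rest (idx + 1)

def find_index_of_kth_occurrence_alt (sequence : String) (element_to_find : String) (occurrence : Int) : Option Int :=
  let positions := findB_positions element_to_find sequence.toList 0
  if 1 ≤ occurrence ∧ occurrence ≤ (positions.length : Int) then
    PySem.List.pyGet? positions (occurrence - 1)
  else none

-- ===== PRECONDITION & SPEC =====
def Spec_find_index_of_kth_occurrence (sequence : String) (element_to_find : String) (occurrence : Int) (out : Option Int) : Prop := out = find_index_of_kth_occurrence_alt sequence element_to_find occurrence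
instance (sequence : String) (element_to_find : String) (occurrence : Int) (out : Option Int) : Decidable (Spec_find_index_of_kth_occurrence sequence element_to_find occurrence out) := by unfold Spec_find_index_of_kth_occurrence; infer_instance

-- ===== CLAIM (what is proved, stated in full; the proofs are below) =====
def Claim_equal_find_index_of_kth_occurrence : Prop := ∀ (sequence : String) (element_to_find : String) (occurrence : Int), Dom_find_index_of_kth_occurrence sequence element_to_find occurrence → Spec_find_index_of_kth_occurrence sequence element_to_find occurrence (find_index_of_kth_occurrence sequence element_to_find occurrence)

-- ===== LEMMAS AND PROOFS =====

lemma findA_eq_get (elem : String) (occ : Int) :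
    ∀ (l : List Char) (idx seen : Int), seen < occ →
      findA_loop elem occ l idx seen =
        (findB_positions elem l idx)[(occ - seen - 1).toNat]? := by
  intro l
  induction l with
  | nil => intro idx seen _; simp [findA_loop, findB_positions]
  | cons c rest ih =>
    intro idx seen hlt
    simp only [findA_loop, findB_positions]
    by_cases hc : String.ofList [c] = elem
    · simp only [if_pos hc]
      by_cases he : seen + 1 = occ
      · have : (occ - seen - 1).toNat = 0 := by omega
        simp [he, this]
      · have h1 : (occ - seen - 1).toNat = (occ - (seen + 1) - 1).toNat + 1 := by omega
        rw [if_neg he, ih (idx + 1) (seen + 1) (by omega), h1]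
        simp
    · simp only [if_neg hc]
      exact ih (idx + 1) seen hlt

-- ===== VERDICT (by name: the statement is the Claim_ definition above) =====
theorem find_index_of_kth_occurrence_spec : Claim_equal_find_index_of_kth_occurrence := by
  intro sequence elem occ _
  unfold Spec_find_index_of_kth_occurrence find_index_of_kth_occurrence find_index_of_kth_occurrence_alt
  by_cases h1 : 1 ≤ occ
  · rw [findA_eq_get elem occ sequence.toList 0 0 (by omega)]
    set P := findB_positions elem sequence.toList 0 with hP
    by_cases h2 : occ ≤ (P.length : Int)
    · rw [if_pos ⟨h1, h2⟩,
        show PySem.List.pyGet? P (occ - 1) = P[(occ - 1).toNat]? from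
          PySem.List.pyGet?_of_nonneg _ (by omega)]
      norm_num
    · rw [if_neg (by tauto)]
      simp only [sub_zero]
      exact List.getElem?_eq_none (by omega)
  · rw [if_neg (by tauto)]
    -- occ ≤ 0: the counter starts at 0 and only grows, so seen + 1 = occ never holds
    have : ∀ (l : List Char) (idx seen : Int), occ ≤ seen → findA_loop elem occ l idx seen = none := by
      intro l
      induction l with
      | nil => intro idx seen _; simp [findA_loop]
      | cons c rest ih =>
        intro idx seen hs
        simp only [findA_loop]
        by_cases hc : String.ofList [c] = elem
        · rw [if_pos hc, if_neg (by omega)]; exact ih _ _ (by omega)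
        · rw [if_neg hc]; exact ih _ _ hs
    exact this _ 0 0 (by omega)
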